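-- pv_equiv track=rewrite | github.com/kinger310/learnpy | leetcode/backtracking/code-40.py | combinationSum22
-- ===== SOURCE A (Python) =====
-- def combinationSum22(candidates: 'List[int]', target: 'int') -> 'List[List[int]]':
--     def backtrack(result, path, s, idx):
--         if s > target:
--             return
--         if s == target:
--             result.append(path)
--             return
--         for i in range(idx, n):
--             if i > idx and candidates[i] == candidates[i-1]:  # skip duplicates
--                 continue
--             backtrack(result, path + [candidates[i]], s + candidates[i], i+1)
--
--     candidates.sort()
--     n = len(candidates)
--     result = []
--     backtrack(result, [], 0, 0)
--     return result
-- ===== SOURCE B (Python) =====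
-- def combinationSum22(candidates: 'List[int]', target: 'int') -> 'List[List[int]]':
--     # Group-and-multiplicity DFS: sorts candidates in place like the original,
--     # then recurses over (value, count) groups instead of indices, so no
--     # per-index duplicate-skip comparisons are needed.
--     candidates.sort()
--
--     def groups_of(lst):
--         if not lst:
--             return []
--         v = lst[0]
--         k = 1
--         while k < len(lst) and lst[k] == v:
--             k += 1
--         return [(v, k)] + groups_of(lst[k:])
--
--     result = []
--
--     def dfs(gs, s, path):
--         if s > target:
--             return
--         if s == target:
--             result.append(path)
--             return
--         if not gs:
--             return
--         (v, c), rest = gs[0], gs[1:]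
--         # how many copies of v can be chained before the sum hits/passes target
--         maxk, exact = c, False
--         cur = s
--         for j in range(1, c + 1):
--             cur += v
--             if cur > target:
--                 maxk, exact = j - 1, False
--                 break
--             if cur == target:
--                 maxk, exact = j - 1, True
--                 break
--         if exact:
--             result.append(path + [v] * (maxk + 1))
--         for k in range(maxk, -1, -1):
--             dfs(rest, s + k * v, path + [v] * k)
--
--     dfs(groups_of(candidates), 0, [])
--     return result
-- ===== Notes on version B (the rewrite author's own statement) =====
-- stated objective: alternative
-- what changed: Replaces A's index-based backtracking with per-index duplicate-skip comparisons by a DFS over (value, count) groups of the sorted list: each group contributes its feasible multiplicities (scanned once per group, emitted high-to-low), with no duplicate-skipping needed.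
import Mathlib
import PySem

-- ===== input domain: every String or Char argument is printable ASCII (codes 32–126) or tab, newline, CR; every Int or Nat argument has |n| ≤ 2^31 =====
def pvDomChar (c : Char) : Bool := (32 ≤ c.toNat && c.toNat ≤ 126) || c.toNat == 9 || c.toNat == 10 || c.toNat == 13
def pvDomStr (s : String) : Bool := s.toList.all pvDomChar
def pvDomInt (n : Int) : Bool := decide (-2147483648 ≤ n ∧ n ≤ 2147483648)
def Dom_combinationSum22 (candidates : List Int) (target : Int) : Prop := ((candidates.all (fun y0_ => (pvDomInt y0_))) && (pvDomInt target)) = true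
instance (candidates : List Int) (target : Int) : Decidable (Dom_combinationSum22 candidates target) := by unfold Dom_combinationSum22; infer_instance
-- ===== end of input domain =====

-- B replaces A's index-based DFS (with per-index duplicate skipping) by a DFS over
-- (value, count) groups of the sorted list; equal return value proved — both Pythons
-- also sort `candidates` in place (same side effect, not modelled here).

-- ===== PORT A =====
-- A's recursive `backtrack` (the `for i in range(idx, n)` loop is `btLoop`;
-- the shared `result` accumulator becomes list concatenation in call order).
mutual
def btA (cs : List Int) (tgt : Int) (path : List Int) (s : Int) (idx : Nat) : List (List Int) :=
  if s > tgt then []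
  else if s = tgt then [path]
  else btLoop cs tgt path s idx idx
  termination_by 2 * (cs.length - min idx cs.length) + 3
  decreasing_by omega
def btLoop (cs : List Int) (tgt : Int) (path : List Int) (s : Int) (idx i : Nat) : List (List Int) :=
  if _h : i < cs.length then
    if idx < i ∧ cs.getD i 0 = cs.getD (i - 1) 0 then btLoop cs tgt path s idx (i + 1)
    else btA cs tgt (path ++ [cs.getD i 0]) (s + cs.getD i 0) (i + 1) ++ btLoop cs tgt path s idx (i + 1)
  else []
  termination_by 2 * (cs.length - i) + 2
  decreasing_by all_goals omega
end

def combinationSum22 (candidates : List Int) (target : Int) : List (List Int) :=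
  btA (PySem.List.sorted candidates (fun x => x) false) target [] 0 0

-- ===== PORT B =====
-- Source B's `groups_of`: leading run length of `v` in the tail, then recurse on the rest.
def countPrefix (v : Int) : List Int → Nat
  | [] => 0
  | w :: t => if w = v then countPrefix v t + 1 else 0

def groupsOf : List Int → List (Int × Nat)
  | [] => []
  | v :: rest => (v, countPrefix v rest + 1) :: groupsOf (rest.drop (countPrefix v rest))
termination_by l => l.length
decreasing_by simp

-- Source B's `for j in range(1, c+1)` scan: returns (maxk, exact).
def scanB (v tgt : Int) (c j : Nat) (cur : Int) : Nat × Bool :=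
  if j ≤ c then
    if cur + v > tgt then (j - 1, false)
    else if cur + v = tgt then (j - 1, true)
    else scanB v tgt c (j + 1) (cur + v)
  else (c, false)
termination_by c + 1 - j

-- Source B's `dfs` (the shared `result` becomes concatenation); `kLoop` is the
-- descending `for k in range(maxk, -1, -1)` loop.
mutual
def dfsB (tgt : Int) (gs : List (Int × Nat)) (s : Int) (path : List Int) : List (List Int) :=
  if s > tgt then []
  else if s = tgt then [path]
  else
    match gs with
    | [] => []
    | (v, c) :: rest =>
      let mk := scanB v tgt c 1 s
      (if mk.2 then [path ++ List.replicate (mk.1 + 1) v] else []) ++ kLoop tgt rest v s path mk.1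
  termination_by (gs.length, 0)
def kLoop (tgt : Int) (rest : List (Int × Nat)) (v s : Int) (path : List Int) (k : Nat) : List (List Int) :=
  dfsB tgt rest (s + (k : Int) * v) (path ++ List.replicate k v) ++
    (match k with
     | 0 => []
     | k' + 1 => kLoop tgt rest v s path k')
  termination_by (rest.length, k + 1)
end

def combinationSum22_alt (candidates : List Int) (target : Int) : List (List Int) :=
  dfsB target (groupsOf (PySem.List.sorted candidates (fun x => x) false)) 0 []

-- ===== PRECONDITION & SPEC =====
def Spec_combinationSum22 (candidates : List Int) (target : Int) (out : List (List Int)) : Prop := out = combinationSum22_alt candidates target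
instance (candidates : List Int) (target : Int) (out : List (List Int)) : Decidable (Spec_combinationSum22 candidates target out) := by unfold Spec_combinationSum22; infer_instance

-- ===== CLAIM (what is proved, stated in full; the proofs are below) =====
def Claim_equal_combinationSum22 : Prop := ∀ (candidates : List Int) (target : Int), Dom_combinationSum22 candidates target → Spec_combinationSum22 candidates target (combinationSum22 candidates target)

-- ===== LEMMAS AND PROOFS =====

-- flatten a group list back to the element list it describes
def flatG (gs : List (Int × Nat)) : List Int := (gs.map (fun g => List.replicate g.2 g.1)).flatten

-- well-formedness of a group list: positive counts, adjacent values distinct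
def GoodG (gs : List (Int × Nat)) : Prop :=
  (∀ g ∈ gs, 1 ≤ g.2) ∧ gs.IsChain (fun a b => a.1 ≠ b.1)

-- the group left after taking one copy off a group of count c
def groupCons (v : Int) (c : Nat) (rest : List (Int × Nat)) : List (Int × Nat) :=
  if c = 0 then rest else (v, c) :: rest

theorem flatG_cons (g : Int × Nat) (gs : List (Int × Nat)) :
    flatG (g :: gs) = List.replicate g.2 g.1 ++ flatG gs := by simp [flatG]

theorem countPrefix_decomp (v : Int) (l : List Int) :
    l = List.replicate (countPrefix v l) v ++ l.drop (countPrefix v l) := by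
  induction l with
  | nil => simp [countPrefix]
  | cons w t ih =>
    by_cases hw : w = v
    · subst hw
      simp only [countPrefix, if_pos, List.replicate_succ, List.cons_append, List.drop_succ_cons]
      simpa using congrArg (List.cons w) ih
    · simp [countPrefix, hw]

theorem countPrefix_drop_head (v : Int) (l : List Int) (w : Int) (t : List Int)
    (h : l.drop (countPrefix v l) = w :: t) : w ≠ v := by
  induction l generalizing t with
  | nil => simp at h
  | cons x r ih =>
    by_cases hx : x = v
    · subst hx
      simp only [countPrefix, if_pos, List.drop_succ_cons] at h
      exact ih _ (by simpa using h)
    · simp only [countPrefix, if_neg hx, List.drop_zero] at h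
      cases h; exact hx

theorem groupsOf_head (l : List Int) (g : Int × Nat) (t : List (Int × Nat))
    (h : groupsOf l = g :: t) : ∃ r, l = g.1 :: r := by
  cases l with
  | nil => simp [groupsOf] at h
  | cons v rest =>
    rw [groupsOf] at h
    exact ⟨rest, by rw [← (List.cons.injEq _ _ _ _).mp h |>.1]⟩

theorem flat_groupsOf : ∀ l : List Int, flatG (groupsOf l) = l
  | [] => by simp [groupsOf, flatG]
  | v :: rest => by
    rw [groupsOf, flatG_cons]
    rw [flat_groupsOf (rest.drop (countPrefix v rest))]
    simp only [List.replicate_succ, List.cons_append]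
    exact congrArg _ (countPrefix_decomp v rest).symm
termination_by l => l.length
decreasing_by simp

theorem good_groupsOf : ∀ l : List Int, GoodG (groupsOf l)
  | [] => by simp [groupsOf, GoodG]
  | v :: rest => by
    have ih := good_groupsOf (rest.drop (countPrefix v rest))
    rw [groupsOf]
    constructor
    · intro g hg
      rcases List.mem_cons.mp hg with h | h
      · simp [h]
      · exact ih.1 g h
    · rcases hgs : groupsOf (rest.drop (countPrefix v rest)) with _ | ⟨g, t⟩
      · simp
      · rw [List.isChain_cons_cons]
        refine ⟨?_, hgs ▸ ih.2⟩
        obtain ⟨r, hr⟩ := groupsOf_head _ _ _ hgs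
        exact fun he => countPrefix_drop_head v rest g.1 r (by rw [hr]) (he ▸ rfl)
termination_by l => l.length
decreasing_by simp

theorem flatG_groupCons (v : Int) (c : Nat) (rest : List (Int × Nat)) :
    flatG (groupCons v c rest) = List.replicate c v ++ flatG rest := by
  rcases c with _ | c' <;> simp [groupCons, flatG_cons]

theorem good_groupCons (v : Int) (c : Nat) (rest : List (Int × Nat))
    (h : GoodG ((v, c + 1) :: rest)) : GoodG (groupCons v c rest) := by
  rcases c with _ | c'
  · exact ⟨fun g hg => h.1 g (List.mem_cons_of_mem _ hg), h.2.tail⟩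
  · simp only [groupCons, if_neg (Nat.succ_ne_zero c')]
    refine ⟨fun g hg => ?_, ?_⟩
    · rcases List.mem_cons.mp hg with hh | hh
      · simp [hh]
      · exact h.1 g (List.mem_cons_of_mem _ hh)
    · rcases rest with _ | ⟨g, t⟩
      · simp
      · rw [List.isChain_cons_cons]
        exact ⟨(List.isChain_cons_cons.mp h.2).1, (List.isChain_cons_cons.mp h.2).2⟩

theorem scanB_shift_aux (v tgt : Int) : ∀ (n c j : Nat) (cur : Int), 1 ≤ j → c + 1 - j ≤ n →
    scanB v tgt (c + 1) (j + 1) cur = ((scanB v tgt c j cur).1 + 1, (scanB v tgt c j cur).2) := by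
  intro n
  induction n with
  | zero =>
    intro c j cur hj hn
    conv_lhs => rw [scanB]
    conv_rhs => rw [scanB]
    rw [if_neg (by omega : ¬ j + 1 ≤ c + 1), if_neg (by omega : ¬ j ≤ c)]
  | succ n ih =>
    intro c j cur hj hn
    conv_lhs => rw [scanB]
    conv_rhs => rw [scanB]
    by_cases hjc : j ≤ c
    · rw [if_pos (by omega : j + 1 ≤ c + 1), if_pos hjc]
      by_cases h1 : cur + v > tgt
      · rw [if_pos h1, if_pos h1]
        simp only [Prod.mk.injEq]
        exact ⟨by omega, trivial⟩
      · rw [if_neg h1, if_neg h1]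
        by_cases h2 : cur + v = tgt
        · rw [if_pos h2, if_pos h2]
          simp only [Prod.mk.injEq]
          exact ⟨by omega, trivial⟩
        · rw [if_neg h2, if_neg h2]
          exact ih c (j + 1) (cur + v) (by omega) (by omega)
    · rw [if_neg (by omega : ¬ j + 1 ≤ c + 1), if_neg hjc]

theorem scanB_shift (v tgt : Int) (c j : Nat) (cur : Int) (hj : 1 ≤ j) :
    scanB v tgt (c + 1) (j + 1) cur = ((scanB v tgt c j cur).1 + 1, (scanB v tgt c j cur).2) :=
  scanB_shift_aux v tgt (c + 1 - j) c j cur hj (le_refl _)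

theorem kLoop_shift (tgt : Int) (rest : List (Int × Nat)) (v : Int) (s : Int) (path : List Int) :
    ∀ k : Nat, kLoop tgt rest v s path (k + 1)
      = kLoop tgt rest v (s + v) (path ++ [v]) k ++ dfsB tgt rest s path := by
  intro k
  induction k with
  | zero =>
    rw [kLoop, kLoop, kLoop]
    simp
  | succ k ih =>
    rw [kLoop]
    conv_rhs => rw [kLoop]
    rw [ih]
    have h1 : s + ((k : Int) + 1 + 1) * v = s + v + ((k : Int) + 1) * v := by ring
    have h2 : path ++ List.replicate (k + 2) v = (path ++ [v]) ++ List.replicate (k + 1) v := by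
      simp [List.replicate_succ]
    push_cast
    rw [h1, h2]
    simp

theorem getD_mid (pre tail : List Int) (v : Int) (c k : Nat) (hk : k < c) :
    (pre ++ (List.replicate c v ++ tail)).getD (pre.length + k) 0 = v := by
  rw [List.getD, List.getElem?_append_right (by omega : pre.length ≤ pre.length + k)]
  rw [Nat.add_sub_cancel_left]
  rw [List.getElem?_append_left (by simpa using hk)]
  simp [hk]

theorem getD_left (pre tail : List Int) (k : Nat) (hk : k < pre.length) :
    (pre ++ tail).getD k 0 = pre.getD k 0 := by
  rw [List.getD, List.getD, List.getElem?_append_left hk]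

-- B's one-group unrolling: entering a group = take one copy now, or skip the group
theorem dfsB_step (tgt v : Int) (c : Nat) (rest : List (Int × Nat)) (s : Int) (path : List Int)
    (hc : 1 ≤ c) (h1 : ¬ s > tgt) (h2 : s ≠ tgt) :
    dfsB tgt ((v, c) :: rest) s path
      = dfsB tgt (groupCons v (c - 1) rest) (s + v) (path ++ [v]) ++ dfsB tgt rest s path := by
  have hL : dfsB tgt ((v, c) :: rest) s path
      = (if (scanB v tgt c 1 s).2 then [path ++ List.replicate ((scanB v tgt c 1 s).1 + 1) v] else [])
        ++ kLoop tgt rest v s path (scanB v tgt c 1 s).1 := by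
    rw [dfsB, if_neg h1, if_neg h2]
  rw [hL]
  by_cases hgt : s + v > tgt
  · have hs : scanB v tgt c 1 s = (1 - 1, false) := by
      rw [scanB, if_pos hc, if_pos hgt]
    rw [hs]
    conv_rhs => rw [dfsB.eq_def]
    rw [if_pos hgt, kLoop]
    simp
  · by_cases heq : s + v = tgt
    · have hs : scanB v tgt c 1 s = (1 - 1, true) := by
        rw [scanB, if_pos hc, if_neg hgt, if_pos heq]
      rw [hs]
      conv_rhs => rw [dfsB.eq_def]
      rw [if_neg hgt, if_pos heq, kLoop]
      simp
    · rcases Nat.exists_eq_add_of_le hc with ⟨c', rfl⟩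
      cases c' with
      | zero =>
        have hs : scanB v tgt 1 1 s = (1, false) := by
          rw [scanB, if_pos (le_refl 1), if_neg hgt, if_neg heq, scanB, if_neg (by omega)]
        norm_num
        rw [hs]
        simp only [if_neg (Bool.false_ne_true), List.nil_append]
        rw [kLoop_shift, kLoop]
        simp [groupCons]
      | succ c'' =>
        have hc1 : 1 + (c'' + 1) = (c'' + 1) + 1 := by omega
        rw [hc1]
        have hs : scanB v tgt (c'' + 1 + 1) 1 s
            = ((scanB v tgt (c'' + 1) 1 (s + v)).1 + 1, (scanB v tgt (c'' + 1) 1 (s + v)).2) := by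
          rw [scanB, if_pos (by omega), if_neg hgt, if_neg heq]
          exact scanB_shift v tgt (c'' + 1) 1 (s + v) (le_refl 1)
        rw [hs]
        have hgc : groupCons v (c'' + 1 + 1 - 1) rest = (v, c'' + 1) :: rest := by
          simp [groupCons]
        rw [hgc]
        conv_rhs => rw [dfsB]
        rw [if_neg hgt, if_neg heq]
        rw [kLoop_shift]
        simp only [List.replicate_succ, List.append_assoc, List.cons_append, List.nil_append]

-- A's loop skips over the duplicate copies of a leading run
theorem btLoop_skip (tgt : Int) (pre : List Int) (v : Int) (c : Nat) (tail path : List Int)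
    (s : Int) (idx : Nat) (hidx : idx ≤ pre.length) (hc : 1 ≤ c) :
    btLoop (pre ++ (List.replicate c v ++ tail)) tgt path s idx (pre.length + 1)
      = btLoop (pre ++ (List.replicate c v ++ tail)) tgt path s idx (pre.length + c) := by
  have aux : ∀ d j, 1 ≤ j → j ≤ c → c - j ≤ d →
      btLoop (pre ++ (List.replicate c v ++ tail)) tgt path s idx (pre.length + j)
        = btLoop (pre ++ (List.replicate c v ++ tail)) tgt path s idx (pre.length + c) := by
    intro d
    induction d with
    | zero =>
      intro j h1 h2 h3
      have : j = c := by omega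
      subst this; rfl
    | succ d ih =>
      intro j h1 h2 h3
      by_cases hjc : j = c
      · subst hjc; rfl
      · have hjc' : j < c := by omega
        rw [btLoop]
        rw [dif_pos (by simp; omega : pre.length + j < (pre ++ (List.replicate c v ++ tail)).length)]
        have g1 : (pre ++ (List.replicate c v ++ tail)).getD (pre.length + j) 0 = v :=
          getD_mid pre tail v c j hjc'
        have g2 : (pre ++ (List.replicate c v ++ tail)).getD (pre.length + j - 1) 0 = v := by
          have hj1 : pre.length + j - 1 = pre.length + (j - 1) := by omega
          rw [hj1]
          exact getD_mid pre tail v c (j - 1) (by omega)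
        rw [if_pos ⟨by omega, g1.trans g2.symm⟩]
        have hj2 : pre.length + j + 1 = pre.length + (j + 1) := by omega
        rw [hj2]
        exact ih (j + 1) (by omega) (by omega) (by omega)
  exact aux (c - 1) 1 (le_refl 1) hc (by omega)

-- the heart: A's backtracking over `pre ++ flatG gs` starting at index |pre|
-- computes exactly B's group DFS over gs
theorem mainAux (tgt : Int) : ∀ m : Nat, ∀ gs : List (Int × Nat), (flatG gs).length = m → GoodG gs →
    (∀ pre path s idx, idx ≤ pre.length →
      (idx = pre.length ∨ ∀ v c rest, gs = (v, c) :: rest → pre.getD (pre.length - 1) 0 ≠ v) →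
      ¬ s > tgt → s ≠ tgt →
      btLoop (pre ++ flatG gs) tgt path s idx pre.length = dfsB tgt gs s path)
    ∧ (∀ pre path s, btA (pre ++ flatG gs) tgt path s pre.length = dfsB tgt gs s path) := by
  intro m
  induction m using Nat.strong_induction_on with
  | _ m IH =>
    intro gs hm hgood
    have hloop : ∀ pre path s idx, idx ≤ pre.length →
        (idx = pre.length ∨ ∀ v c rest, gs = (v, c) :: rest → pre.getD (pre.length - 1) 0 ≠ v) →
        ¬ s > tgt → s ≠ tgt →
        btLoop (pre ++ flatG gs) tgt path s idx pre.length = dfsB tgt gs s path := by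
      intro pre path s idx hidx hdisj hs1 hs2
      cases gs with
      | nil =>
        rw [btLoop, dif_neg (by simp [flatG] : ¬ pre.length < (pre ++ flatG []).length)]
        rw [dfsB, if_neg hs1, if_neg hs2]
      | cons g rest =>
        obtain ⟨v, c⟩ := g
        have hc : 1 ≤ c := hgood.1 (v, c) List.mem_cons_self
        have hmc : c + (flatG rest).length = m := by
          simpa [flatG_cons] using hm
        have hgrest : GoodG rest := ⟨fun g hg => hgood.1 g (List.mem_cons_of_mem _ hg), hgood.2.tail⟩
        have hcs : pre ++ flatG ((v, c) :: rest) = pre ++ (List.replicate c v ++ flatG rest) := by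
          rw [flatG_cons]
        rw [hcs]
        set cs := pre ++ (List.replicate c v ++ flatG rest) with hcsdef
        have gv : cs.getD pre.length 0 = v := by
          simpa using getD_mid pre (flatG rest) v c 0 (by omega)
        have hskip : ¬ (idx < pre.length ∧ cs.getD pre.length 0 = cs.getD (pre.length - 1) 0) := by
          rintro ⟨hlt, heqd⟩
          rcases hdisj with h | h
          · omega
          · have hpre : pre.length - 1 < pre.length := by omega
            have : cs.getD (pre.length - 1) 0 = pre.getD (pre.length - 1) 0 :=
              getD_left pre _ _ hpre
            exact h v c rest rfl (by rw [← this, ← heqd, gv])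
        rw [btLoop, dif_pos (by simp [hcsdef]; omega : pre.length < cs.length), if_neg hskip, gv]
        have hA : btA cs tgt (path ++ [v]) (s + v) (pre.length + 1)
            = dfsB tgt (groupCons v (c - 1) rest) (s + v) (path ++ [v]) := by
          have hrep : List.replicate c v = v :: List.replicate (c - 1) v := by
            conv_lhs => rw [show c = (c - 1) + 1 by omega]
            rw [List.replicate_succ]
          have hre : cs = (pre ++ [v]) ++ flatG (groupCons v (c - 1) rest) := by
            rw [hcsdef, flatG_groupCons, hrep]
            simp
          have hlen : (flatG (groupCons v (c - 1) rest)).length = m - 1 := by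
            rw [flatG_groupCons]
            simp; omega
          have := (IH (m - 1) (by omega) (groupCons v (c - 1) rest) hlen
            (good_groupCons v (c - 1) rest (by rwa [show c - 1 + 1 = c by omega]))).2
            (pre ++ [v]) (path ++ [v]) (s + v)
          rw [hre]
          simpa using this
        have hL2 : btLoop cs tgt path s idx (pre.length + 1) = dfsB tgt rest s path := by
          rw [hcsdef, btLoop_skip tgt pre v c (flatG rest) path s idx hidx hc]
          have hre2 : pre ++ (List.replicate c v ++ flatG rest)
              = (pre ++ List.replicate c v) ++ flatG rest := by simp
          have hlen2 : pre.length + c = (pre ++ List.replicate c v).length := by simp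
          rw [hre2, hlen2]
          refine (IH (m - c) (by omega) rest (by omega) hgrest).1
            (pre ++ List.replicate c v) path s idx (by simp; omega) ?_ hs1 hs2
          right
          intro w d r2 hrest
          have hwv : v ≠ w := by
            have := hgood.2
            rw [hrest, List.isChain_cons_cons] at this
            exact this.1
          have hlast : (pre ++ List.replicate c v).getD ((pre ++ List.replicate c v).length - 1) 0 = v := by
            have h1 : (pre ++ List.replicate c v).length - 1 = pre.length + (c - 1) := by
              simp; omega
            rw [h1]
            have := getD_mid pre ([] : List Int) v c (c - 1) (by omega)
            simpa using this
          rw [hlast]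
          exact hwv
        rw [hA, hL2]
        exact (dfsB_step tgt v c rest s path hc hs1 hs2).symm
    refine ⟨hloop, ?_⟩
    intro pre path s
    rw [btA]
    by_cases hs1 : s > tgt
    · rw [if_pos hs1, dfsB.eq_def, if_pos hs1]
    · by_cases hs2 : s = tgt
      · rw [if_neg hs1, if_pos hs2, dfsB.eq_def, if_neg hs1, if_pos hs2]
      · rw [if_neg hs1, if_neg hs2]
        exact hloop pre path s pre.length (le_refl _) (Or.inl rfl) hs1 hs2

-- ===== VERDICT (by name: the statement is the Claim_ definition above) =====
theorem combinationSum22_spec : Claim_equal_combinationSum22 := by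
  intro candidates target _
  unfold Spec_combinationSum22 combinationSum22 combinationSum22_alt
  have h := (mainAux target (flatG (groupsOf (PySem.List.sorted candidates (fun x => x) false))).length
      (groupsOf (PySem.List.sorted candidates (fun x => x) false)) rfl
      (good_groupsOf _)).2 [] [] 0
  simpa [flat_groupsOf] using h
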